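-- pv_equiv track=rewrite | github.com/justinadrmun/st-acde | custom_plot_funcs/custom_legend_barplot_v2.py | add_new_lines_v2
-- ===== SOURCE A (Python) =====
-- def add_new_lines_v2(s):
--     """Insert newlines into a string for better readability."""
--     words = s.split(' ')
--     new_s = ''
--     for i, word in enumerate(words):
--         if i % 3 == 0 and i != 0:
--             new_s += '\n'
--         new_s += word + ' '
--     return new_s
-- ===== SOURCE B (Python) =====
-- def add_new_lines_v2(s):
--     """Insert newlines into a string for better readability."""
--     words = s.split(' ')
--     groups = [' '.join(words[i:i+3]) + ' ' for i in range(0, len(words), 3)]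
--     return '\n'.join(groups)
-- ===== Notes on version B (the rewrite author's own statement) =====
-- stated objective: idiomatic
-- what changed: Replaces the word-by-word loop with an i%3 flag and string accumulation by chunking the word list into triples with range(0,len,3)/slicing, formatting each triple once, and a single newline join.
import Mathlib
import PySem

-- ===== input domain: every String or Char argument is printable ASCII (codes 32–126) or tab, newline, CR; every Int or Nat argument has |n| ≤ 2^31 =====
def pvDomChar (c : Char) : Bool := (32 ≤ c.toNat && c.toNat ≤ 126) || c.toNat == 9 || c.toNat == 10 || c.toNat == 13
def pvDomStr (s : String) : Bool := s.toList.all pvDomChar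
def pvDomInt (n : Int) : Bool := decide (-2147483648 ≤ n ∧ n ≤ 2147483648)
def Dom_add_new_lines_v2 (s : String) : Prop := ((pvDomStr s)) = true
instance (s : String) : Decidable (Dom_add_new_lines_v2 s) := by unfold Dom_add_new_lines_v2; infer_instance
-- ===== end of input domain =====

-- B splits the words into triples (range-step-3 + slices) and newline-joins the formatted
-- triples, instead of A's word-by-word loop with an i % 3 check; same cost, plainer.

-- ===== PORT A =====
def add_new_lines_v2 (s : String) : String :=
  -- words = s.split(' '); the sep is the nonempty literal ' ', so split? always returns some (exact)
  let words := (PySem.Str.split? s " ").getD []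
  -- new_s = ''; for i, word in enumerate(words): if i % 3 == 0 and i != 0: new_s += '\n'; new_s += word + ' '
  (PySem.List.enumerate words 0).foldl
    (fun new_s iw =>
      (if iw.1 % 3 == 0 && iw.1 != 0 then new_s ++ "\n" else new_s) ++ iw.2 ++ " ")
    ""

-- ===== PORT B =====
def add_new_lines_v2_alt (s : String) : String :=
  -- words = s.split(' ')
  let words := (PySem.Str.split? s " ").getD []
  -- groups = [' '.join(words[i:i+3]) + ' ' for i in range(0, len(words), 3)]
  let groups := (PySem.List.pyRange 0 (words.length : Int) 3).map
      (fun i => PySem.Str.join " " (PySem.List.slice words (some i) (some (i + 3))) ++ " ")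
  -- return '\n'.join(groups)
  PySem.Str.join "\n" groups

-- ===== PRECONDITION & SPEC =====
def Spec_add_new_lines_v2 (s : String) (out : String) : Prop := out = add_new_lines_v2_alt s
instance (s : String) (out : String) : Decidable (Spec_add_new_lines_v2 s out) := by unfold Spec_add_new_lines_v2; infer_instance

-- ===== CLAIM (what is proved, stated in full; the proofs are below) =====
def Claim_equal_add_new_lines_v2 : Prop := ∀ (s : String), Dom_add_new_lines_v2 s → Spec_add_new_lines_v2 s (add_new_lines_v2 s)

-- ===== LEMMAS AND PROOFS =====
def pvStepA (new_s : String) (iw : Int × String) : String :=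
  (if iw.1 % 3 == 0 && iw.1 != 0 then new_s ++ "\n" else new_s) ++ iw.2 ++ " "
def pvGroupB (ws : List String) (i : Int) : String :=
  PySem.Str.join " " (PySem.List.slice ws (some i) (some (i + 3))) ++ " "
lemma pyRange_three_nil (a b : Int) (h : b ≤ a) : PySem.List.pyRange a b 3 = [] := by
  simp only [PySem.List.pyRange]; norm_num; intro h'; omega
lemma pyRange_three_cons (a b : Int) (h : a < b) :
    PySem.List.pyRange a b 3 = a :: PySem.List.pyRange (a + 3) b 3 := by
  simp only [PySem.List.pyRange]
  norm_num
  rw [if_pos h]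
  by_cases h3 : a + 3 < b
  · rw [if_pos h3]
    have hc : ((b - a + 3 - 1) / 3).toNat = ((b - (a+3) + 3 - 1)/3).toNat + 1 := by omega
    rw [hc, List.range_succ_eq_map]
    refine List.cons_eq_cons.mpr ⟨by norm_num, ?_⟩
    rw [List.map_map]
    apply List.map_congr_left; intro k _; simp only [Function.comp_apply]; push_cast; ring
  · rw [if_neg h3]
    have hc : ((b - a + 3 - 1) / 3).toNat = 1 := by omega
    rw [hc]
    simp
lemma pyRange_three_shift (a b : Int) :
    PySem.List.pyRange (a + 3) (b + 3) 3 = (PySem.List.pyRange a b 3).map (· + 3) := by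
  simp only [PySem.List.pyRange]; norm_num; intro k _; ring
lemma mapGroupB_shift (ws : List String) :
    (PySem.List.pyRange 3 (ws.length : Int) 3).map (pvGroupB ws)
      = (PySem.List.pyRange 0 ((ws.drop 3).length : Int) 3).map (pvGroupB (ws.drop 3)) := by
  by_cases hL : ws.length ≤ 3
  · rw [pyRange_three_nil 3 _ (by exact_mod_cast hL), pyRange_three_nil 0 _ (by simp; omega)]
    simp
  · push Not at hL
    have h1 : (ws.length : Int) = ((ws.drop 3).length : Int) + 3 := by simp; omega
    have h2 : PySem.List.pyRange 3 (((ws.drop 3).length : Int) + 3) 3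
        = (PySem.List.pyRange 0 ((ws.drop 3).length : Int) 3).map (· + 3) := by
      have h3 := pyRange_three_shift 0 ((ws.drop 3).length : Int)
      rw [zero_add] at h3; rw [h3]
    rw [h1, h2, List.map_map]
    apply List.map_congr_left
    intro i hi
    have h0 : 0 ≤ i := by
      rcases (PySem.List.mem_pyRange_iff_of_pos (by norm_num) i).mp hi with ⟨h, _⟩
      omega
    simp only [Function.comp_apply, pvGroupB]
    lift i to ℕ using h0 with n
    have e1 : ((n : Int) + 3).toNat = n + 3 := by omega
    have e2 : ((n : Int) + 3 + 3).toNat = n + 6 := by omega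
    have e3 : ((n : Int)).toNat = n := by omega
    rw [PySem.List.slice_toNat _ (by omega) (by omega),
        PySem.List.slice_toNat _ (by omega) (by omega),
        e1, e2, e3, List.drop_drop]
    have c1 : n + 6 - (n + 3) = 3 := by omega
    have c2 : n + 3 - n = 3 := by omega
    have c3 : 3 + n = n + 3 := by omega
    rw [c1, c2, c3]
lemma stepA_head (acc : String) (m : Nat) (w : String) :
    pvStepA acc (3 * (m : Int), w)
      = acc ++ (if m = 0 then "" else "\n") ++ w ++ " " := by
  by_cases hm : m = 0 <;> simp [pvStepA, hm]
lemma stepA_mid (acc : String) (m : Nat) (w : String) (r : Int) (h1 : r = 1 ∨ r = 2) :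
    pvStepA acc (3 * (m : Int) + r, w) = acc ++ w ++ " " := by
  rcases h1 with h | h <;> subst h <;> simp [pvStepA]
lemma groupB_zero (ws : List String) :
    pvGroupB ws 0 = PySem.Str.join " " (ws.take 3) ++ " " := by
  simp only [pvGroupB]
  rw [PySem.List.slice_toNat _ le_rfl (by norm_num)]
  norm_num
  have h3 : ((3 : Int)).toNat = 3 := rfl
  rw [h3]
lemma key_lemma (n : Nat) (ws : List String) (hn : ws.length ≤ n) (m : Nat) (acc : String) :
    (PySem.List.enumerate ws (3 * (m : Int))).foldl pvStepA acc
      = acc ++ (if ws = [] ∨ m = 0 then "" else "\n")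
          ++ PySem.Str.join "\n" ((PySem.List.pyRange 0 (ws.length : Int) 3).map (pvGroupB ws)) := by
  induction n generalizing ws m acc with
  | zero =>
    have hws : ws = [] := List.length_eq_zero_iff.mp (Nat.le_zero.mp hn)
    subst hws
    apply String.toList_injective
    simp [PySem.List.enumerate_nil, pyRange_three_nil, PySem.Str.toList_join, PySem.Chars.join_nil]
  | succ n ih =>
    match ws with
    | [] =>
      apply String.toList_injective
      simp [PySem.List.enumerate_nil, pyRange_three_nil, PySem.Str.toList_join, PySem.Chars.join_nil]
    | [w0] =>
      rw [pyRange_three_cons 0 (([w0].length : Int)) (by norm_num), zero_add,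
          pyRange_three_nil 3 (([w0].length : Int)) (by norm_num)]
      simp only [PySem.List.enumerate_cons, PySem.List.enumerate_nil, List.foldl_cons,
        List.foldl_nil, List.map_cons, List.map_nil, groupB_zero]
      rw [stepA_head]
      by_cases hm0 : m = 0
      all_goals
        apply String.toList_injective
        simp [hm0, PySem.Str.toList_join, PySem.Chars.join_singleton]
    | [w0, w1] =>
      rw [pyRange_three_cons 0 (([w0, w1].length : Int)) (by norm_num), zero_add,
          pyRange_three_nil 3 (([w0, w1].length : Int)) (by norm_num)]
      simp only [PySem.List.enumerate_cons, List.foldl_cons, PySem.List.enumerate_nil,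
        List.foldl_nil, List.map_cons, List.map_nil, groupB_zero]
      rw [stepA_head, stepA_mid _ _ _ _ (Or.inl rfl)]
      by_cases hm0 : m = 0
      all_goals
        apply String.toList_injective
        simp [hm0, PySem.Str.toList_join, PySem.Chars.join_singleton, PySem.Chars.join_cons_cons]
    | w0 :: w1 :: w2 :: tl2 =>
      rw [pyRange_three_cons 0 (((w0 :: w1 :: w2 :: tl2).length : Int)) (by exact_mod_cast Nat.succ_pos (w1 :: w2 :: tl2).length), zero_add]
      simp only [List.map_cons, groupB_zero]
      have hshift := mapGroupB_shift (w0 :: w1 :: w2 :: tl2)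
      simp only [List.drop_succ_cons, List.drop_zero] at hshift
      rw [hshift]
      simp only [PySem.List.enumerate_cons, List.foldl_cons]
      rw [stepA_head, stepA_mid _ _ _ _ (Or.inl rfl)]
      have e2 : 3 * (m : Int) + 1 + 1 = 3 * (m : Int) + 2 := by ring
      rw [e2, stepA_mid _ _ _ _ (Or.inr rfl)]
      have e3 : 3 * (m : Int) + 2 + 1 = 3 * ((m + 1 : Nat) : Int) := by push_cast; ring
      rw [e3, ih tl2 (by simp at hn ⊢; omega) (m + 1)]
      by_cases htl2 : tl2 = []
      · subst htl2
        rw [pyRange_three_nil 0 (([] : List String).length : Int) (by norm_num)]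
        by_cases hm0 : m = 0
        all_goals
          apply String.toList_injective
          simp [hm0, PySem.Str.toList_join, PySem.Chars.join_singleton,
            PySem.Chars.join_cons_cons, PySem.Chars.join_nil]
      · have hc : PySem.List.pyRange 0 (tl2.length : Int) 3
            = 0 :: PySem.List.pyRange 3 (tl2.length : Int) 3 := by
          apply pyRange_three_cons
          have h4 : tl2.length ≠ 0 := fun h => htl2 (List.length_eq_zero_iff.mp h)
          omega
        rw [hc]
        by_cases hm0 : m = 0
        all_goals
          apply String.toList_injective
          simp [hm0, htl2, PySem.Str.toList_join, PySem.Chars.join_singleton,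
            PySem.Chars.join_cons_cons]

-- ===== VERDICT (by name: the statement is the Claim_ definition above) =====
theorem add_new_lines_v2_spec : Claim_equal_add_new_lines_v2 := by
  intro s _
  unfold Spec_add_new_lines_v2 add_new_lines_v2 add_new_lines_v2_alt
  have h := key_lemma ((PySem.Str.split? s " ").getD []).length
    ((PySem.Str.split? s " ").getD []) le_rfl 0 ""
  have h0 : (3 * ((0 : Nat) : Int)) = 0 := by norm_num
  rw [h0] at h
  show List.foldl pvStepA "" _ = PySem.Str.join "\n" (List.map (pvGroupB _) _)
  rw [h]
  apply String.toList_injective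
  simp
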